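-- pv_equiv track=rewrite | github.com/Housgun/git_experiment | DataFrame.py | label_redo
-- ===== SOURCE A (Python) =====
-- def label_redo(l):
--   for i, j in enumerate(l):
--     if((j == 2) and (i != len(l) -1)):
--         k = i+1
--         while((l[k] == 2) and (k != len(l) -1)):
--             k +=1
--         if(k >= len(l)):
--             break
--         else:
--             l[i] = l[k]
--   return l
-- ===== SOURCE B (Python) =====
-- def label_redo(l):
--     # One right-to-left pass carrying the nearest non-2 value seen so far.
--     carry = None
--     for i in range(len(l) - 1, -1, -1):
--         if l[i] != 2:
--             carry = l[i]
--         elif carry is not None: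
--             l[i] = carry
--     return l
-- ===== Notes on version B (the rewrite author's own statement) =====
-- stated objective: alternative
-- what changed: Replaced A's left-to-right scan with a per-2 rightward rescan (inner while loop, quadratic on 2-dense lists) by a single right-to-left pass that carries the nearest non-2 value seen so far.
import Mathlib
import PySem

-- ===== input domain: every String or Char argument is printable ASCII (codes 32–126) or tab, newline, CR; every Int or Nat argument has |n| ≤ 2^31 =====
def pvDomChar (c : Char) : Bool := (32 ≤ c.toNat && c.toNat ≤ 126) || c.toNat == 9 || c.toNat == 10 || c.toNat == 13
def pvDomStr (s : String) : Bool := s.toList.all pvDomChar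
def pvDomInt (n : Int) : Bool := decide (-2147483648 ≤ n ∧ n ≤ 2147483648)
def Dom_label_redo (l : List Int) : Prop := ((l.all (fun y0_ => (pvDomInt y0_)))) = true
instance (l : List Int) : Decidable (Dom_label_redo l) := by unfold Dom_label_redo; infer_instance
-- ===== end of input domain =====

-- B replaces A's per-2 rightward rescan (inner while loop) by one right-to-left pass carrying
-- the nearest non-2 value seen so far; both mutate l in place identically (equal return values proved).

-- ===== PORT A =====
-- inner while loop: advance k while l[k] == 2 and k != len(l)-1
def labelRedoFindK (l : List Int) (k : Nat) : Nat :=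
  if l.getD k 0 = 2 ∧ k ≠ l.length - 1 then
    if h : k < l.length - 1 then labelRedoFindK l (k + 1) else k
  else k
termination_by l.length - k
decreasing_by omega

-- outer for loop over i (enumerate); j = l[i]; `break` returns the list as is
def labelRedoGo (l : List Int) (i : Nat) : List Int :=
  if h : i < l.length then
    let j := l.getD i 0
    if j = 2 ∧ i ≠ l.length - 1 then
      let k := labelRedoFindK l (i + 1)
      if k ≥ l.length then l
      else labelRedoGo (l.set i (l.getD k 0)) (i + 1)
    else labelRedoGo l (i + 1)
  else l
termination_by l.length - i
decreasing_by all_goals simp_all; omega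

def label_redo (l : List Int) : List Int := labelRedoGo l 0

-- ===== PORT B =====
-- for i in range(len(l)-1, -1, -1): carry := l[i] if l[i] != 2; else write carry (if any) at i
def labelRedoAltGo (l : List Int) (carry : Option Int) : Nat → List Int
  | 0 => l
  | i + 1 =>
    let v := l.getD i 0
    if v ≠ 2 then labelRedoAltGo l (some v) i
    else
      match carry with
      | some c => labelRedoAltGo (l.set i c) carry i
      | none => labelRedoAltGo l carry i

def label_redo_alt (l : List Int) : List Int := labelRedoAltGo l none l.length

-- ===== PRECONDITION & SPEC =====
def Spec_label_redo (l : List Int) (out : List Int) : Prop := out = label_redo_alt l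
instance (l : List Int) (out : List Int) : Decidable (Spec_label_redo l out) := by unfold Spec_label_redo; infer_instance

-- ===== CLAIM (what is proved, stated in full; the proofs are below) =====
def Claim_equal_label_redo : Prop := ∀ (l : List Int), Dom_label_redo l → Spec_label_redo l (label_redo l)

-- ===== LEMMAS AND PROOFS =====

-- common specification: each element x is replaced, when x = 2, by the first non-2 value in the
-- remaining suffix, falling back to the carry `c` (none = keep x)
def labelRedoSpecC (c : Option Int) : List Int → List Int
  | [] => []
  | x :: xs =>
    (if x = 2 then
      (match xs.find? (· ≠ 2) with
       | some v => v
       | none => match c with | some cc => cc | none => x)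
     else x) :: labelRedoSpecC c xs

theorem set_take_self (l : List Int) (i : Nat) (v : Int) :
    (l.set i v).take i = l.take i := by
  rw [List.take_set, List.set_eq_of_length_le (by simp)]

theorem set_take_succ (l : List Int) (i : Nat) (v : Int) (h : i < l.length) :
    (l.set i v).take (i + 1) = l.take i ++ [v] := by
  rw [List.set_eq_take_append_cons_drop, if_pos h]
  rw [show i + 1 = (l.take i).length + 1 by simp [List.length_take]; omega]
  rw [List.take_append]
  simp

theorem set_drop_succ (l : List Int) (i : Nat) (v : Int) :
    (l.set i v).drop (i + 1) = l.drop (i + 1) := by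
  rw [List.drop_set, if_pos (by omega)]

theorem findK_lt (l : List Int) (k : Nat) (hk : k < l.length) :
    labelRedoFindK l k < l.length := by
  unfold labelRedoFindK
  split
  · split
    · exact findK_lt l (k + 1) (by omega)
    · exact hk
  · exact hk
termination_by l.length - k
decreasing_by omega

theorem findK_val (l : List Int) (k : Nat) (hk : k < l.length) :
    ((l.drop k).find? (· ≠ 2) = some (l.getD (labelRedoFindK l k) 0)) ∨
    ((l.drop k).find? (· ≠ 2) = none ∧ l.getD (labelRedoFindK l k) 0 = 2) := by
  have hdrop : l.drop k = l[k] :: l.drop (k + 1) := List.drop_eq_getElem_cons hk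
  have hget : l.getD k 0 = l[k] := List.getD_eq_getElem l 0 hk
  by_cases h2 : l.getD k 0 = 2
  · by_cases hlast : k ≠ l.length - 1
    · have hk1 : k < l.length - 1 := by omega
      rw [labelRedoFindK, if_pos ⟨h2, hlast⟩, dif_pos hk1]
      have ih := findK_val l (k + 1) (by omega)
      have h2' : l[k] = 2 := hget ▸ h2
      rw [hdrop, List.find?_cons_of_neg (by simp [h2'])]
      exact ih
    · rw [labelRedoFindK, if_neg (by tauto)]
      right
      refine ⟨?_, h2⟩
      have hdrop2 : l.drop (k + 1) = [] := List.drop_eq_nil_of_le (by omega)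
      have h2' : l[k] = 2 := hget ▸ h2
      rw [hdrop, hdrop2]
      simp [List.find?, h2']
  · rw [labelRedoFindK, if_neg (by tauto)]
    left
    have h2' : l[k] ≠ 2 := hget ▸ h2
    rw [hdrop, List.find?_cons_of_pos (by simp [h2']), hget]
termination_by l.length - k
decreasing_by omega

-- invariant for A's outer loop
theorem goA_eq (i : Nat) (l : List Int) (hi : i ≤ l.length) :
    labelRedoGo l i = l.take i ++ labelRedoSpecC none (l.drop i) := by
  by_cases h : i < l.length
  · have hdrop : l.drop i = l[i] :: l.drop (i + 1) := List.drop_eq_getElem_cons h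
    have hget : l.getD i 0 = l[i] := List.getD_eq_getElem l 0 h
    have htake : l.take (i + 1) = l.take i ++ [l[i]] := by
      rw [List.take_add_one, List.getElem?_eq_getElem h]; simp
    rw [labelRedoGo, dif_pos h]
    by_cases hc : l.getD i 0 = 2 ∧ i ≠ l.length - 1
    · rw [if_pos hc]
      have hk1 : i + 1 < l.length := by omega
      have hklt : labelRedoFindK l (i + 1) < l.length := findK_lt l (i + 1) hk1
      have hnotge : ¬ (labelRedoFindK l (i + 1) ≥ l.length) := by omega
      rw [if_neg hnotge]
      set v := l.getD (labelRedoFindK l (i + 1)) 0 with hv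
      have ih := goA_eq (i + 1) (l.set i v) (by simp; omega)
      rw [ih, set_take_succ l i v h, set_drop_succ l i v, hdrop]
      simp only [labelRedoSpecC]
      rw [if_pos (hget ▸ hc.1)]
      rcases findK_val l (i + 1) hk1 with hfind | ⟨hfind, hval⟩
      · rw [hfind]
        simp only [List.append_assoc, List.singleton_append]
        rfl
      · rw [hfind]
        have hveq : v = l[i] := by
          rw [hv, hval]; exact (hget ▸ hc.1).symm
        rw [hveq]
        simp only [List.append_assoc, List.singleton_append]
    · rw [if_neg hc]
      have ih := goA_eq (i + 1) l (by omega)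
      by_cases h2 : l[i] = 2
      · have hlast : i = l.length - 1 := by
          by_contra hne
          exact hc ⟨hget ▸ h2, hne⟩
        have hdrop2 : l.drop (i + 1) = [] := List.drop_eq_nil_of_le (by omega)
        rw [ih, hdrop, hdrop2, htake]
        simp only [labelRedoSpecC, List.append_nil, List.find?_nil]
        rw [if_pos h2]
      · rw [ih, hdrop]
        simp only [labelRedoSpecC]
        rw [if_neg h2, htake]
        simp only [List.append_assoc, List.singleton_append]
  · have hlen : i = l.length := by omega
    rw [labelRedoGo, dif_neg h, hlen]
    simp [labelRedoSpecC]
termination_by l.length - i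
decreasing_by
  all_goals
    try simp only [List.length_set]
    omega

-- specC on a snoc: the appended last element becomes the carry for the rest
theorem specC_append_singleton (c : Option Int) (ys : List Int) (v : Int) :
    labelRedoSpecC c (ys ++ [v]) =
      labelRedoSpecC (if v ≠ 2 then some v else c) ys ++
        [if v = 2 then (match c with | some cc => cc | none => v) else v] := by
  induction ys with
  | nil =>
    by_cases h2 : v = 2 <;> simp [labelRedoSpecC, h2]
  | cons x xs ih =>
    simp only [List.cons_append, labelRedoSpecC, ih, List.find?_append]
    congr 1
    by_cases hx : x = 2
    · simp only [hx, if_true]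
      cases hfind : xs.find? (· ≠ 2) with
      | some w => simp
      | none =>
        by_cases h2 : v = 2
        · simp [h2]
        · simp [h2, List.find?]
    · simp [hx]

-- invariant for B's loop: positions < i of l are still original; carry applies to them
theorem goB_eq (i : Nat) (l : List Int) (carry : Option Int) (hi : i ≤ l.length) :
    labelRedoAltGo l carry i = labelRedoSpecC carry (l.take i) ++ l.drop i := by
  induction i generalizing l carry with
  | zero => simp [labelRedoAltGo, labelRedoSpecC]
  | succ i ih =>
    have h : i < l.length := by omega
    have hget : l.getD i 0 = l[i] := List.getD_eq_getElem l 0 h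
    have htake : l.take (i + 1) = l.take i ++ [l[i]] := by
      rw [List.take_add_one, List.getElem?_eq_getElem h]; simp
    have hdrop : l.drop i = l[i] :: l.drop (i + 1) := List.drop_eq_getElem_cons h
    have hstep : labelRedoAltGo l carry (i + 1) =
        if l.getD i 0 ≠ 2 then labelRedoAltGo l (some (l.getD i 0)) i
        else match carry with
          | some c => labelRedoAltGo (l.set i c) carry i
          | none => labelRedoAltGo l carry i := rfl
    rw [hstep]
    by_cases h2 : l.getD i 0 = 2
    · rw [if_neg (by simp only [ne_eq, not_not]; exact h2)]
      cases carry with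
      | none =>
        rw [ih l none (by omega), htake, specC_append_singleton, hdrop]
        rw [hget] at h2
        simp [h2]
      | some c =>
        rw [show (match (some c : Option Int) with
              | some c => labelRedoAltGo (l.set i c) (some c) i
              | none => labelRedoAltGo l (some c) i) =
            labelRedoAltGo (l.set i c) (some c) i from rfl]
        rw [ih (l.set i c) (some c) (by simp; omega),
          set_take_self l i c, htake, specC_append_singleton]
        rw [hget] at h2
        have hdropset : (l.set i c).drop i = c :: l.drop (i + 1) := by
          rw [List.drop_set, if_neg (by omega), Nat.sub_self, hdrop]
          rfl
        rw [hdropset]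
        simp [h2]
    · rw [if_pos h2, ih l (some (l.getD i 0)) (by omega), htake,
        specC_append_singleton, hdrop]
      rw [hget] at h2 ⊢
      simp [h2]

-- ===== VERDICT (by name: the statement is the Claim_ definition above) =====
theorem label_redo_spec : Claim_equal_label_redo := by
  intro l _
  unfold Spec_label_redo label_redo label_redo_alt
  rw [goA_eq 0 l (by omega), goB_eq l.length l none (le_refl _)]
  simp
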